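-- pv_equiv track=rewrite | github.com/UL-FRI-NLP-2023-2024/ul-fri-nlp-course-project-processingbit | src/saved_llm.py | find_first
-- ===== SOURCE A (Python) =====
-- def find_first(sentence, items):
--     first = len(sentence)
--     item = None
--     for i in items:
--         index = sentence.find(i)
--         if index != -1 and index < first:
--             first = index
--             item = i
--     if item is None:
--         item = 'None'
--     return item
-- ===== SOURCE B (Python) =====
-- def find_first(sentence, items):
--     # Scan positions left to right; at the earliest position where any item
--     # starts, return the first such item in items order.
--     for p in range(len(sentence)):
--         for item in items:
--             if sentence[p:p + len(item)] == item:
--                 return item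
--     return 'None'
-- ===== Notes on version B (the rewrite author's own statement) =====
-- stated objective: faster
-- what changed: Instead of computing find() for every item and folding a running minimum index with tie-breaking, B scans sentence positions left to right and returns the first item (in items order) that starts at the earliest matching position, so it exits as soon as the earliest match is seen instead of scanning the whole sentence once per item.
import Mathlib
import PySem

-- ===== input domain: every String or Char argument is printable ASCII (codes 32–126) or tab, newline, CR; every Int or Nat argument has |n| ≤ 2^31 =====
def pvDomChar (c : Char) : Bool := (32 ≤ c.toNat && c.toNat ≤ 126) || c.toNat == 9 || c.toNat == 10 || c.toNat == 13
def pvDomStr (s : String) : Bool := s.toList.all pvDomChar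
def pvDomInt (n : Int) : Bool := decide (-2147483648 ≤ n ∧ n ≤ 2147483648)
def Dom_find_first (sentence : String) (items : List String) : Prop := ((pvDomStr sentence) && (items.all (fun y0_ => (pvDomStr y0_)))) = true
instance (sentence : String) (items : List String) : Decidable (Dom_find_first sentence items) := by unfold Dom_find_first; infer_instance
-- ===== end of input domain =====

-- B scans sentence positions left to right and returns the first item (items order) starting at the
-- earliest matching position, exiting at the first match instead of running find() once per item.

-- ===== PORT A =====
def find_first (sentence : String) (items : List String) : String :=
  let first : Int := PySem.Str.len sentence
  let item : Option String := none
  let r := items.foldl (fun (st : Int × Option String) (i : String) =>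
    let index := PySem.Str.find sentence i
    if index ≠ -1 ∧ index < st.1 then (index, some i) else st) (first, item)
  match r.2 with
  | none => "None"
  | some it => it

-- ===== PORT B =====
-- inner loop of Source B: first item whose slice-match at position p succeeds
def find_first_check (s : List Char) (p : Int) (it : String) : Bool :=
  PySem.List.slice s (some p) (some (p + (it.toList.length : Int))) == it.toList

def find_first_altLoop (s : List Char) (items : List String) : List Int → Option String
  | [] => none
  | p :: ps =>
    match items.find? (find_first_check s p) with
    | some it => some it
    | none => find_first_altLoop s items ps

def find_first_alt (sentence : String) (items : List String) : String :=
  match find_first_altLoop sentence.toList items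
      (PySem.List.pyRange 0 (PySem.Str.len sentence) 1) with
  | some it => it
  | none => "None"

-- ===== PRECONDITION & SPEC =====
def Spec_find_first (sentence : String) (items : List String) (out : String) : Prop := out = find_first_alt sentence items
instance (sentence : String) (items : List String) (out : String) : Decidable (Spec_find_first sentence items out) := by unfold Spec_find_first; infer_instance

-- ===== CLAIM (what is proved, stated in full; the proofs are below) =====
def Claim_equal_find_first : Prop := ∀ (sentence : String) (items : List String), Dom_find_first sentence items → Spec_find_first sentence items (find_first sentence items)

-- ===== LEMMAS AND PROOFS =====

lemma ff_check_iff (s : List Char) (p : Nat) (it : String) :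
    find_first_check s (p : Int) it = true ↔ it.toList <+: s.drop p := by
  unfold find_first_check
  rw [PySem.List.slice_natCast_add, beq_iff_eq]
  rw [List.prefix_iff_eq_take]
  exact eq_comm

lemma ff_find?_congr_mem {α : Type} (l : List α) (p q : α → Bool)
    (h : ∀ x ∈ l, p x = q x) : l.find? p = l.find? q := by
  induction l with
  | nil => rfl
  | cons x t ih =>
    simp only [List.find?_cons]
    rw [h x (by simp)]
    cases q x
    · exact ih (fun y hy => h y (by simp [hy]))
    · rfl

lemma ff_occ_lt (s : List Char) (j : List Char) (hn : 0 < s.length)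
    (h0 : 0 ≤ PySem.Chars.find s j) : PySem.Chars.find s j < (s.length : Int) := by
  by_contra hle
  push Not at hle
  have hsp := (PySem.Chars.find_spec h0).1
  have hdrop : s.drop (PySem.Chars.find s j).toNat = [] := by
    apply List.drop_eq_nil_of_le
    omega
  rw [hdrop, List.prefix_nil] at hsp
  rw [hsp, PySem.Chars.find_nil] at hle
  omega

lemma ff_foldA_none (s : List Char) (l : List String) (st : Int × Option String)
    (h : ∀ i ∈ l, ¬ (PySem.Chars.find s i.toList ≠ -1 ∧ PySem.Chars.find s i.toList < st.1)) :
    l.foldl (fun (st : Int × Option String) (i : String) =>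
      let index := PySem.Chars.find s i.toList
      if index ≠ -1 ∧ index < st.1 then (index, some i) else st) st = st := by
  induction l with
  | nil => rfl
  | cons x t ih =>
    simp only [List.foldl_cons]
    rw [if_neg (h x (by simp))]
    exact ih (fun i hi => h i (by simp [hi]))

lemma ff_foldA_winner (s : List Char) (l : List String) (st : Int × Option String) (i0 : String)
    (h0 : 0 ≤ PySem.Chars.find s i0.toList)
    (hlt : PySem.Chars.find s i0.toList < st.1)
    (hmin : ∀ j ∈ l, 0 ≤ PySem.Chars.find s j.toList →
      PySem.Chars.find s i0.toList ≤ PySem.Chars.find s j.toList)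
    (hfirst : l.find? (fun j => PySem.Chars.find s j.toList == PySem.Chars.find s i0.toList) = some i0) :
    (l.foldl (fun (st : Int × Option String) (i : String) =>
      let index := PySem.Chars.find s i.toList
      if index ≠ -1 ∧ index < st.1 then (index, some i) else st) st).2 = some i0 := by
  induction l generalizing st with
  | nil => simp at hfirst
  | cons x t ih =>
    simp only [List.foldl_cons]
    by_cases hx : PySem.Chars.find s x.toList = PySem.Chars.find s i0.toList
    · -- find? stops at x, so x = i0
      rw [List.find?_cons_of_pos (by simpa using hx)] at hfirst
      obtain rfl : x = i0 := by simpa using hfirst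
      rw [if_pos ⟨by omega, hlt⟩]
      rw [ff_foldA_none]
      intro j hj hcond
      have h1 : -1 ≤ PySem.Chars.find s j.toList := PySem.Chars.neg_one_le_find s j.toList
      have := hmin j (by simp [hj]) (by omega)
      omega
    · rw [List.find?_cons_of_neg (by simpa using hx)] at hfirst
      have hmin' : ∀ j ∈ t, 0 ≤ PySem.Chars.find s j.toList →
          PySem.Chars.find s i0.toList ≤ PySem.Chars.find s j.toList :=
        fun j hj => hmin j (by simp [hj])
      by_cases hc : PySem.Chars.find s x.toList ≠ -1 ∧ PySem.Chars.find s x.toList < st.1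
      · rw [if_pos hc]
        have : PySem.Chars.find s i0.toList < PySem.Chars.find s x.toList := by
          have h1 : -1 ≤ PySem.Chars.find s x.toList := PySem.Chars.neg_one_le_find s x.toList
          have := hmin x (by simp) (by omega)
          omega
        exact ih ⟨PySem.Chars.find s x.toList, some x⟩ this hmin' hfirst
      · rw [if_neg hc]
        exact ih st hlt hmin' hfirst
lemma ff_altLoop_none (s : List Char) (items : List String) (k : Nat) :
    ∀ a : Nat, (∀ p : Nat, a ≤ p → p < a + k → items.find? (find_first_check s (p : Int)) = none) →
    find_first_altLoop s items ((List.range' a k).map (fun (q : Nat) => (q : Int))) = none := by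
  induction k with
  | zero => intro a h; rfl
  | succ k ih =>
    intro a h
    rw [List.range'_succ, List.map_cons, find_first_altLoop]
    rw [h a (le_refl a) (by omega)]
    exact ih (a + 1) (fun p h1 h2 => h p (by omega) (by omega))

lemma ff_altLoop_found (s : List Char) (items : List String) (k : Nat) (i0 : String) :
    ∀ a p : Nat, a ≤ p → p < a + k →
    (∀ q : Nat, a ≤ q → q < p → items.find? (find_first_check s (q : Int)) = none) →
    items.find? (find_first_check s (p : Int)) = some i0 →
    find_first_altLoop s items ((List.range' a k).map (fun (q : Nat) => (q : Int))) = some i0 := by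
  induction k with
  | zero => intro a p h1 h2; omega
  | succ k ih =>
    intro a p h1 h2 hbefore hat
    rw [List.range'_succ, List.map_cons, find_first_altLoop]
    by_cases hap : a = p
    · subst hap; rw [hat]
    · rw [hbefore a (le_refl a) (by omega)]
      exact ih (a + 1) p (by omega) (by omega)
        (fun q hq1 hq2 => hbefore q (by omega) hq2) hat

theorem ff_main (sentence : String) (items : List String) :
    find_first sentence items = find_first_alt sentence items := by
  unfold find_first find_first_alt
  simp only [PySem.Str.find_eq, PySem.Str.len_eq, PySem.List.pyRange_zero_natCast,
    List.range_eq_range']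
  set s := sentence.toList with hs
  by_cases hE : ∃ p : Nat, p < s.length ∧ ∃ i ∈ items, i.toList <+: s.drop p
  · -- some item occurs somewhere
    classical
    set P : Nat → Prop := fun p => p < s.length ∧ ∃ i ∈ items, i.toList <+: s.drop p with hP
    have hfp := Nat.find_spec hE
    set p0 : Nat := Nat.find hE with hp0
    have hn : 0 < s.length := by omega
    -- the first matching item at position p0
    have hsome : (items.find? (find_first_check s (p0 : Int))).isSome := by
      apply List.find?_isSome.mpr
      obtain ⟨-, i, hi, hipre⟩ := hfp
      exact ⟨i, hi, (ff_check_iff s p0 i).mpr hipre⟩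
    obtain ⟨i0, hi0⟩ := Option.isSome_iff_exists.mp hsome
    have hi0mem : i0 ∈ items := List.mem_of_find?_eq_some hi0
    have hi0pre : i0.toList <+: s.drop p0 := (ff_check_iff s p0 i0).mp (List.find?_some hi0)
    -- lower bound: every found occurrence is at p0 or later
    have hlow : ∀ j : String, j ∈ items → 0 ≤ PySem.Chars.find s j.toList →
        (p0 : Int) ≤ PySem.Chars.find s j.toList := by
      intro j hj h0j
      have hjlt := ff_occ_lt s j.toList hn h0j
      have hjpre := (PySem.Chars.find_spec h0j).1
      have hple : p0 ≤ (PySem.Chars.find s j.toList).toNat := by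
        apply Nat.find_min' hE
        exact ⟨by omega, j, hj, hjpre⟩
      omega
    -- characterisation: matching at p0 is exactly having find-index p0
    have hchar : ∀ j : String, j ∈ items →
        (j.toList <+: s.drop p0 ↔ PySem.Chars.find s j.toList = (p0 : Int)) := by
      intro j hj
      constructor
      · intro hpre
        have h0j : 0 ≤ PySem.Chars.find s j.toList := by
          rw [PySem.Chars.find_nonneg_iff]
          rw [← PySem.Chars.isIn_iff_infix]
          exact (PySem.Chars.exists_prefix_drop_iff_isIn j.toList s).mp ⟨p0, hpre⟩
        have hge := hlow j hj h0j
        have hmin2 := (PySem.Chars.find_spec h0j).2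
        by_contra hne
        have hlt2 : p0 < (PySem.Chars.find s j.toList).toNat := by omega
        exact hmin2 p0 hlt2 hpre
      · intro heq
        have h0j : 0 ≤ PySem.Chars.find s j.toList := by omega
        have := (PySem.Chars.find_spec h0j).1
        rwa [heq, Int.toNat_natCast] at this
    have hocc0 : PySem.Chars.find s i0.toList = (p0 : Int) := (hchar i0 hi0mem).mp hi0pre
    -- B returns i0
    have hB : find_first_altLoop s items ((List.range' 0 s.length).map (fun (q : Nat) => (q : Int)))
        = some i0 := by
      apply ff_altLoop_found s items s.length i0 0 p0 (Nat.zero_le _) (by omega) _ hi0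
      intro q hq1 hq2
      apply List.find?_eq_none.mpr
      intro j hj hchk
      have hqpre := (ff_check_iff s q j).mp hchk
      exact Nat.find_min hE hq2 ⟨by omega, j, hj, hqpre⟩
    -- A returns i0
    have hA : (items.foldl (fun (st : Int × Option String) (i : String) =>
        let index := PySem.Chars.find s i.toList
        if index ≠ -1 ∧ index < st.1 then (index, some i) else st)
        ((s.length : Int), (none : Option String))).2 = some i0 := by
      apply ff_foldA_winner s items _ i0 (by omega) (by rw [hocc0]; show (p0:Int) < (s.length:Int); exact_mod_cast hfp.1)
      · intro j hj h0j
        rw [hocc0]; exact hlow j hj h0j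
      · rw [← hi0]
        apply ff_find?_congr_mem
        intro j hj
        rw [Bool.eq_iff_iff, ff_check_iff, beq_iff_eq, hocc0]
        exact (hchar j hj).symm
    rw [hA, hB]
  · -- no item occurs anywhere: both return "None"
    have hB : find_first_altLoop s items ((List.range' 0 s.length).map (fun (q : Nat) => (q : Int)))
        = none := by
      apply ff_altLoop_none
      intro p hp1 hp2
      apply List.find?_eq_none.mpr
      intro j hj hchk
      exact hE ⟨p, by omega, j, hj, (ff_check_iff s p j).mp hchk⟩
    have hA : (items.foldl (fun (st : Int × Option String) (i : String) =>
        let index := PySem.Chars.find s i.toList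
        if index ≠ -1 ∧ index < st.1 then (index, some i) else st)
        ((s.length : Int), (none : Option String))).2 = none := by
      rw [ff_foldA_none]
      intro j hj ⟨hne, hlt⟩
      have h1 := PySem.Chars.neg_one_le_find s j.toList
      have h0j : 0 ≤ PySem.Chars.find s j.toList := by omega
      have hpre := (PySem.Chars.find_spec h0j).1
      refine hE ⟨(PySem.Chars.find s j.toList).toNat, by omega, j, hj, hpre⟩
    rw [hA, hB]

-- ===== VERDICT (by name: the statement is the Claim_ definition above) =====
theorem find_first_spec : Claim_equal_find_first := by
  intro sentence items _
  exact ff_main sentence items
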